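-- pv_equiv track=rewrite | github.com/N1co0L/CS-101-LABS | assignment 9 week 9.py | get_reported_month_dict
-- ===== SOURCE A (Python) =====
-- def get_reported_month_dict(main_list,months_dict):
--   month_dict = {}
--   for key in range(len(main_list)):
--     temp_list = (main_list[key][1]).split('/')
--     month = months_dict[temp_list[0]]
--     try:
--       month_dict[month]['number of crimes'] += 1
--     except KeyError:
--       month_dict[month] = {}
--       month_dict[month]['number of crimes'] = 1
--   return(month_dict)
-- ===== SOURCE B (Python) =====
-- def get_reported_month_dict(main_list, months_dict):
--     # extract -> count -> reshape pipeline instead of one accumulating loop with try/except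
--     names = [months_dict[row[1].split('/')[0]] for row in main_list]
--     return {name: {'number of crimes': names.count(name)} for name in dict.fromkeys(names)}
-- ===== Notes on version B (the rewrite author's own statement) =====
-- stated objective: simpler
-- what changed: A's single accumulating loop over a nested dict with try/except counting is replaced by an extract-count-reshape pipeline: one comprehension maps each row to its month name, then a dict comprehension over the first-occurrence dedup builds {name: {'number of crimes': count}} via list.count.
import Mathlib
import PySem

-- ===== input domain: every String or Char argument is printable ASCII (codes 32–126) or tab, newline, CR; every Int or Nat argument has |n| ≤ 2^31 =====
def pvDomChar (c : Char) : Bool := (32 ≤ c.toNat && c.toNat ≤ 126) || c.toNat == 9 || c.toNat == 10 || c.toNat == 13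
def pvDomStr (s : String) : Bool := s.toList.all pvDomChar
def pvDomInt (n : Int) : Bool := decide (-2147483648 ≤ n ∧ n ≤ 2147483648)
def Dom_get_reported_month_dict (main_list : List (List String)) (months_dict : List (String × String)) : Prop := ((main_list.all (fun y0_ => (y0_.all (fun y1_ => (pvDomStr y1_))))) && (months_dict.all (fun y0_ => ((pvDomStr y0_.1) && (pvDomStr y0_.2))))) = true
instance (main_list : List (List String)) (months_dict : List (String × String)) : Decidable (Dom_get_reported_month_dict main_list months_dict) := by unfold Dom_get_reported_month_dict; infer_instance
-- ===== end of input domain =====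

-- B replaces A's accumulating nested-dict loop with try/except by an extract → count → reshape
-- comprehension pipeline (objective: simpler; same contents and first-occurrence key order).

-- ===== PORT A =====
-- literal port of A: fold over the rows keeping the nested dict of dicts; the try/except is the
-- match on the chained lookup (the caught KeyError ↔ the chained get? is none); the nested
-- PySem.Dicts are rendered as association lists at return (the convention's dict type).
def get_reported_month_dict (main_list : List (List String)) (months_dict : List (String × String)) : List (String × List (String × Int)) :=
  (main_list.foldl (fun month_dict row =>
      let temp_list := (PySem.Str.split? ((PySem.List.pyGet? row 1).getD "") "/").getD []
      let month := ((PySem.Dict.mk months_dict).get? ((PySem.List.pyGet? temp_list 0).getD "")).getD ""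
      match (month_dict.get? month).bind
              (fun inner => (inner.get? "number of crimes").map (fun c => (inner, c))) with
      | some (inner, c) => month_dict.insert month (inner.insert "number of crimes" (c + 1))
      | none => month_dict.insert month (PySem.Dict.empty.insert "number of crimes" 1)
    ) (PySem.Dict.empty : PySem.Dict String (PySem.Dict String Int))).items.map
    (fun p => (p.1, p.2.items))

-- ===== PORT B =====
-- port of Source B: map out the month names, then reshape the first-occurrence dedup with counts.
def get_reported_month_dict_alt (main_list : List (List String)) (months_dict : List (String × String)) : List (String × List (String × Int)) :=
  let names := main_list.map (fun row =>
    ((PySem.Dict.mk months_dict).get?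
      ((PySem.List.pyGet? ((PySem.Str.split? ((PySem.List.pyGet? row 1).getD "") "/").getD []) 0).getD "")).getD "")
  (PySem.List.dedup names).map
    (fun name => (name, [("number of crimes", (names.count name : Int))]))

-- ===== PRECONDITION & SPEC =====
-- Pre_ excludes exactly the inputs on which the Python A raises: a row with fewer than 2 entries
-- (IndexError at row[1]) or a row whose leading '/'-token of row[1] is not a key of months_dict
-- (uncaught KeyError at months_dict[...]).
def Pre_get_reported_month_dict (main_list : List (List String)) (months_dict : List (String × String)) : Prop :=
  ∀ row ∈ main_list, 2 ≤ row.length ∧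
    ((PySem.Dict.mk months_dict).contains
      ((PySem.List.pyGet? ((PySem.Str.split? ((PySem.List.pyGet? row 1).getD "") "/").getD []) 0).getD "")) = true
instance (main_list : List (List String)) (months_dict : List (String × String)) : Decidable (Pre_get_reported_month_dict main_list months_dict) := by unfold Pre_get_reported_month_dict; infer_instance

def pvWitness_get_reported_month_dict : List (List String) × (List (String × String)) :=
  ([["id1", "1/2/2020"], ["id2", "2/3/2020"], ["id3", "1/9/2020"]], [("1", "January"), ("2", "February")])

def Spec_get_reported_month_dict (main_list : List (List String)) (months_dict : List (String × String)) (out : List (String × List (String × Int))) : Prop := out = get_reported_month_dict_alt main_list months_dict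
instance (main_list : List (List String)) (months_dict : List (String × String)) (out : List (String × List (String × Int))) : Decidable (Spec_get_reported_month_dict main_list months_dict out) := by unfold Spec_get_reported_month_dict; infer_instance

-- ===== CLAIM (what is proved, stated in full; the proofs are below) =====
def Claim_equal_get_reported_month_dict : Prop := ∀ (main_list : List (List String)) (months_dict : List (String × String)), Dom_get_reported_month_dict main_list months_dict → Pre_get_reported_month_dict main_list months_dict → Spec_get_reported_month_dict main_list months_dict (get_reported_month_dict main_list months_dict)

-- ===== LEMMAS AND PROOFS =====

-- the inner singleton dict {'number of crimes': c} and the coupling between A's nested dict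
-- of dicts and the flat counter dict B tallies
def pvSing (c : Int) : PySem.Dict String Int := PySem.Dict.mk [("number of crimes", c)]
def pvF (p : String × Int) : String × PySem.Dict String Int := (p.1, pvSing p.2)
def pvMapD (d : PySem.Dict String Int) : PySem.Dict String (PySem.Dict String Int) :=
  PySem.Dict.mk (d.items.map pvF)

-- A's loop body as a function of the accumulated dict and the already-extracted month name
def pvStep (month_dict : PySem.Dict String (PySem.Dict String Int)) (month : String) : PySem.Dict String (PySem.Dict String Int) :=
  match (month_dict.get? month).bind
          (fun inner => (inner.get? "number of crimes").map (fun c => (inner, c))) with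
  | some (inner, c) => month_dict.insert month (inner.insert "number of crimes" (c + 1))
  | none => month_dict.insert month (PySem.Dict.empty.insert "number of crimes" 1)

theorem pvFind?_map (l : List (String × Int)) (k : String) :
    List.find? (fun p => p.1 == k) (l.map pvF) = (List.find? (fun p => p.1 == k) l).map pvF := by
  induction l with
  | nil => rfl
  | cons p l ih =>
    by_cases h : (p.1 == k) = true <;> simp [pvF, h, ih]

theorem pvMapD_get? (d : PySem.Dict String Int) (k : String) :
    (pvMapD d).get? k = (d.get? k).map (fun c => pvSing c) := by
  simp only [pvMapD, PySem.Dict.get?, pvFind?_map, Option.map_map]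
  cases List.find? (fun p => p.1 == k) d.items <;> rfl

theorem pvMapD_contains (d : PySem.Dict String Int) (k : String) :
    (pvMapD d).contains k = d.contains k := by
  simp only [pvMapD, PySem.Dict.contains, List.any_map]
  rfl

theorem pvMap_replace_comm (l : List (String × Int)) (k : String) (c : Int) :
    List.map (fun p => if (p.1 == k) = true then (k, pvSing c) else p) (l.map pvF)
      = List.map pvF (l.map (fun p => if (p.1 == k) = true then (k, c) else p)) := by
  simp only [List.map_map]
  apply List.map_congr_left
  intro p _
  by_cases h : p.1 = k <;> simp [pvF, h]

theorem pvStep_mapD (d : PySem.Dict String Int) (k : String) :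
    pvStep (pvMapD d) k = pvMapD (d.modify k 0 (· + 1)) := by
  unfold pvStep
  rw [pvMapD_get?]
  rcases h : d.get? k with _ | c
  · have hc : d.contains k = false := (PySem.Dict.get?_eq_none_iff_contains d k).mp h
    simp only [Option.map_none, Option.bind_none, PySem.Dict.modify, PySem.Dict.getD, h,
      Option.getD_none, PySem.Dict.insert, pvMapD_contains, hc, Bool.false_eq_true, if_false]
    simp [pvMapD, pvF, pvSing, PySem.Dict.empty]
  · have hc : d.contains k = true := by
      by_contra hb
      have hf : d.contains k = false := by revert hb; cases d.contains k <;> simp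
      rw [(PySem.Dict.get?_eq_none_iff_contains d k).mpr hf] at h
      simp at h
    have hD : d.getD k 0 = c := by simp [PySem.Dict.getD, h]
    have hinner : (PySem.Dict.mk [(("number of crimes" : String), c)]).get? "number of crimes" = some c := by
      simp [PySem.Dict.get?]
    simp only [Option.map_some, Option.bind_some, pvSing, hinner, PySem.Dict.modify]
    rw [hD]
    have hsing : (PySem.Dict.mk [(("number of crimes" : String), c)]).insert "number of crimes" (c + 1)
        = pvSing (c + 1) := by
      simp [PySem.Dict.insert, PySem.Dict.contains, pvSing]
    rw [hsing]
    simp only [PySem.Dict.insert, pvMapD_contains, hc, if_true]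
    simp only [pvMapD]
    exact congrArg PySem.Dict.mk (pvMap_replace_comm d.items k (c + 1))

theorem pvFoldl_mapD (l : List String) (d : PySem.Dict String Int) :
    l.foldl pvStep (pvMapD d) = pvMapD (l.foldl (fun d x => d.modify x 0 (· + 1)) d) := by
  induction l generalizing d with
  | nil => rfl
  | cons x xs ih => simp only [List.foldl_cons, pvStep_mapD, ih]

-- ===== VERDICT (by name: the statement is the Claim_ definition above) =====
theorem get_reported_month_dict_spec : Claim_equal_get_reported_month_dict := by
  intro ml md _ _
  unfold Spec_get_reported_month_dict get_reported_month_dict get_reported_month_dict_alt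
  have h1 : (ml.foldl (fun month_dict row =>
      let temp_list := (PySem.Str.split? ((PySem.List.pyGet? row 1).getD "") "/").getD []
      let month := ((PySem.Dict.mk md).get? ((PySem.List.pyGet? temp_list 0).getD "")).getD ""
      match (month_dict.get? month).bind
              (fun inner => (inner.get? "number of crimes").map (fun c => (inner, c))) with
      | some (inner, c) => month_dict.insert month (inner.insert "number of crimes" (c + 1))
      | none => month_dict.insert month (PySem.Dict.empty.insert "number of crimes" 1))
      (PySem.Dict.empty : PySem.Dict String (PySem.Dict String Int)))
      = (ml.map (fun row =>
          ((PySem.Dict.mk md).get?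
            ((PySem.List.pyGet? ((PySem.Str.split? ((PySem.List.pyGet? row 1).getD "") "/").getD []) 0).getD "")).getD "")).foldl
          pvStep PySem.Dict.empty := by
    rw [List.foldl_map]; rfl
  rw [h1]
  have h0 : (PySem.Dict.empty : PySem.Dict String (PySem.Dict String Int)) = pvMapD PySem.Dict.empty := rfl
  rw [h0, pvFoldl_mapD, ← PySem.Dict.counter_eq_foldl]
  simp [pvMapD, pvF, pvSing, PySem.Dict.items_counter, List.map_map, Function.comp,
    PySem.List.dedup_eq_ofList]
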